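-- pv_equiv track=rewrite | github.com/karamkharrathelou/1-Detection-Algorithm | detection.py | combine_inboxes
-- ===== SOURCE A (Python) =====
-- def combine_inboxes(boxes):
--     result = []
--
--     for i, box1 in enumerate(boxes):
--         combined = False
--
--         for j, box2 in enumerate(boxes):
--             if i != j:  # Avoid comparing a box to itself
--                 if (
--                     box1[0] >= box2[0]
--                     and box1[1] <= box2[1]
--                     and box1[2] >= box2[2]
--                     and box1[3] <= box2[3]
--                 ):
--                     # box1 is inside box2
--                     combined = True
--                     break
--
--         if not combined:
--             result.append(box1)
--
--     return result
-- ===== SOURCE B (Python) =====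
-- def combine_inboxes(boxes):
--     # Count boxes by their 4-coordinate key (duplicates contain each other,
--     # so any key occurring twice is eliminated).
--     counts = {}
--     for b in boxes:
--         k = (b[0], b[1], b[2], b[3])
--         counts[k] = counts.get(k, 0) + 1
--
--     def inside(p, q):
--         return p[0] >= q[0] and p[1] <= q[1] and p[2] >= q[2] and p[3] <= q[3]
--
--     # Incremental Pareto frontier over the distinct keys: after the loop the
--     # frontier holds exactly the keys not contained in any other distinct key
--     # (containment is transitive, so dominance by a processed key is always
--     # witnessed by a frontier member).
--     frontier = []
--     for k in counts:
--         if any(inside(k, m) for m in frontier):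
--             continue
--         frontier = [m for m in frontier if not inside(m, k)]
--         frontier.append(k)
--
--     keep = {k for k in frontier if counts[k] == 1}
--     return [b for b in boxes if (b[0], b[1], b[2], b[3]) in keep]
-- ===== Notes on version B (the rewrite author's own statement) =====
-- stated objective: alternative
-- what changed: Replaces the all-pairs containment scan by three passes: a dict counting boxes by their 4-coordinate key, an incremental Pareto frontier over the distinct keys that prunes dominated keys as it is built, and a set-membership filter over the original list.
-- outside the precondition, e.g. on combine_inboxes([[1]]): A returns [[1]], B raises IndexError; on combine_inboxes([[1, 3], [0, 2]]): A returns [[1, 3], [0, 2]], B raises IndexError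
import Mathlib
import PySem

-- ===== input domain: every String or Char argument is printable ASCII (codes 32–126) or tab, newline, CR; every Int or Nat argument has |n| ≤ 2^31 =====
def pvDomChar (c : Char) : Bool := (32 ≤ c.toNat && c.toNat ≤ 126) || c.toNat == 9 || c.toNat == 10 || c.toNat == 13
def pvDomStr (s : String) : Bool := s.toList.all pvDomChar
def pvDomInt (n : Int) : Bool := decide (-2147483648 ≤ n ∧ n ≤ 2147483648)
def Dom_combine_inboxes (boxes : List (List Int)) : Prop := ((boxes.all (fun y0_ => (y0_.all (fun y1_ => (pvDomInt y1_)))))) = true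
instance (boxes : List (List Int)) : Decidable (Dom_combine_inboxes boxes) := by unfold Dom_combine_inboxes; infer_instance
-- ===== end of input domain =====

-- B replaces A's all-pairs containment scan by three passes: a dict counting boxes by their
-- 4-coordinate key, an incremental Pareto frontier over the distinct keys, and a set-membership
-- filter over the original list.

-- ===== PORT A =====
-- 'box1 is inside box2' test (indexing exact under Pre_):
def pvInside (b1 b2 : List Int) : Bool :=
  decide (PySem.List.pyGetD b1 0 0 ≥ PySem.List.pyGetD b2 0 0) &&
  decide (PySem.List.pyGetD b1 1 0 ≤ PySem.List.pyGetD b2 1 0) &&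
  decide (PySem.List.pyGetD b1 2 0 ≥ PySem.List.pyGetD b2 2 0) &&
  decide (PySem.List.pyGetD b1 3 0 ≤ PySem.List.pyGetD b2 3 0)

-- inner 'for j, box2 in enumerate(boxes): if i != j: if inside: combined = True; break'
def pvInnerA (i : Int) (box1 : List Int) : List (Int × List Int) → Bool
  | [] => false
  | (j, box2) :: rest =>
      if i ≠ j then
        if pvInside box1 box2 then true else pvInnerA i box1 rest
      else pvInnerA i box1 rest

def combine_inboxes (boxes : List (List Int)) : List (List Int) :=
  (PySem.List.enumerate boxes 0).foldl
    (fun result p =>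
      let combined := pvInnerA p.1 p.2 (PySem.List.enumerate boxes 0)
      if !combined then result ++ [p.2] else result)
    []

-- ===== PORT B =====
-- k = (b[0], b[1], b[2], b[3])  (indexing exact under Pre_)
def pvKey (b : List Int) : Int × Int × Int × Int :=
  (PySem.List.pyGetD b 0 0, PySem.List.pyGetD b 1 0,
   PySem.List.pyGetD b 2 0, PySem.List.pyGetD b 3 0)

-- inside(p, q) on 4-coordinate keys
def pvInside4 (p q : Int × Int × Int × Int) : Bool :=
  decide (p.1 ≥ q.1) && decide (p.2.1 ≤ q.2.1) &&
  decide (p.2.2.1 ≥ q.2.2.1) && decide (p.2.2.2 ≤ q.2.2.2)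

-- 'counts[k] = counts.get(k, 0) + 1'
def pvCounts (boxes : List (List Int)) : PySem.Dict (Int × Int × Int × Int) Int :=
  boxes.foldl (fun d b => d.insert (pvKey b) (d.getD (pvKey b) 0 + 1)) PySem.Dict.empty

-- one step of the frontier loop body
def pvFrontStep (frontier : List (Int × Int × Int × Int)) (k : Int × Int × Int × Int) :
    List (Int × Int × Int × Int) :=
  if frontier.any (fun m => pvInside4 k m) then frontier
  else frontier.filter (fun m => !pvInside4 m k) ++ [k]

def combine_inboxes_alt (boxes : List (List Int)) : List (List Int) :=
  let counts := pvCounts boxes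
  let frontier := counts.keys.foldl pvFrontStep []
  let keep : PySem.Set (Int × Int × Int × Int) :=
    PySem.Set.ofList (frontier.filter (fun k => counts.getD k 0 == 1))
  boxes.filter (fun b => PySem.Set.contains keep (pvKey b))

-- ===== PRECONDITION & SPEC =====
-- Pre_ excludes lists containing a box with fewer than 4 coordinates: there A can raise
-- IndexError, and where short-circuiting lets A still return, B's full 4-coordinate key raises.
def Pre_combine_inboxes (boxes : List (List Int)) : Prop :=
  ∀ b ∈ boxes, 4 ≤ b.length
instance (boxes : List (List Int)) : Decidable (Pre_combine_inboxes boxes) := by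
  unfold Pre_combine_inboxes; infer_instance

def pvWitness_combine_inboxes : List (List Int) := [[0, 10, 0, 10], [2, 5, 2, 5]]

def Spec_combine_inboxes (boxes : List (List Int)) (out : List (List Int)) : Prop := out = combine_inboxes_alt boxes
instance (boxes : List (List Int)) (out : List (List Int)) : Decidable (Spec_combine_inboxes boxes out) := by unfold Spec_combine_inboxes; infer_instance

-- ===== CLAIM (what is proved, stated in full; the proofs are below) =====
def Claim_equal_combine_inboxes : Prop := ∀ (boxes : List (List Int)), Dom_combine_inboxes boxes → Pre_combine_inboxes boxes → Spec_combine_inboxes boxes (combine_inboxes boxes)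

-- ===== LEMMAS AND PROOFS =====

-- basic order facts about the containment test on keys
theorem pvInside4_refl (k : Int × Int × Int × Int) : pvInside4 k k = true := by
  simp [pvInside4]

theorem pvInside4_trans {a b c : Int × Int × Int × Int}
    (h1 : pvInside4 a b = true) (h2 : pvInside4 b c = true) : pvInside4 a c = true := by
  obtain ⟨a1, a2, a3, a4⟩ := a; obtain ⟨b1, b2, b3, b4⟩ := b; obtain ⟨c1, c2, c3, c4⟩ := c
  simp only [pvInside4, Bool.and_eq_true, decide_eq_true_eq] at *
  omega

theorem pvInside4_antisymm {a b : Int × Int × Int × Int}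
    (h1 : pvInside4 a b = true) (h2 : pvInside4 b a = true) : a = b := by
  obtain ⟨a1, a2, a3, a4⟩ := a; obtain ⟨b1, b2, b3, b4⟩ := b
  simp only [pvInside4, Bool.and_eq_true, decide_eq_true_eq, Prod.mk.injEq] at *
  omega

theorem pvInside_eq_inside4 (b c : List Int) :
    pvInside b c = pvInside4 (pvKey b) (pvKey c) := rfl

-- ===== A-side: the inner loop is an 'any', and A is a filter by a count =====

theorem pvInnerA_eq_any (i : Int) (b : List Int) (l : List (Int × List Int)) :
    pvInnerA i b l = l.any (fun q => decide (i ≠ q.1) && pvInside b q.2) := by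
  induction l with
  | nil => rfl
  | cons q rest ih =>
      obtain ⟨j, c⟩ := q
      by_cases hij : i ≠ j
      · by_cases hin : pvInside b c = true <;>
          simp [pvInnerA, hij, hin, ih]
      · simp [pvInnerA, hij, ih]

-- split a countP along an auxiliary Bool test
theorem countP_split {α : Type} (l : List α) (p r : α → Bool) :
    l.countP p = l.countP (fun x => p x && r x) + l.countP (fun x => p x && !r x) := by
  induction l with
  | nil => rfl
  | cons x xs ih =>
      by_cases hp : p x = true
      · by_cases hr : r x = true <;>
          simp [hp, hr, ih] <;> omega
      · simp [hp, ih]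

-- in a list of pairs with strictly increasing keys that contains (i, b),
-- exactly one element has key i and passes the inside test
theorem countP_key_eq_one (i : Int) (b : List Int)
    (l : List (Int × List Int))
    (hpw : l.Pairwise (fun p q => p.1 < q.1))
    (hmem : (i, b) ∈ l) (hself : pvInside b b = true) :
    l.countP (fun q => pvInside b q.2 && decide (q.1 = i)) = 1 := by
  induction l with
  | nil => simp at hmem
  | cons q rest ih =>
      obtain ⟨j, c⟩ := q
      rw [List.pairwise_cons] at hpw
      rcases List.mem_cons.mp hmem with h | h
      · injection h with h1 h2
        subst h1; subst h2
        have hrest : rest.countP (fun q => pvInside b q.2 && decide (q.1 = i)) = 0 := by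
          rw [List.countP_eq_zero]
          intro a ha
          have h' := hpw.1 a ha
          simp only at h'
          simp only [Bool.and_eq_true, decide_eq_true_eq, not_and]
          intro _
          omega
        simp [hself, hrest]
      · have hji : j ≠ i := by
          have := hpw.1 _ h
          simp only at this
          omega
        have := ih hpw.2 h
        simp [hji, this]

-- pointwise: A's per-index keep test equals a count-based keep test
theorem keep_eq (boxes : List (List Int)) (p : Int × List Int)
    (hp : p ∈ PySem.List.enumerate boxes 0) :
    (!pvInnerA p.1 p.2 (PySem.List.enumerate boxes 0)) =
      (boxes.countP (fun c => pvInside p.2 c) == 1) := by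
  obtain ⟨i, b⟩ := p
  have hpw := PySem.List.pairwise_lt_enumerate (xs := boxes) (s := 0)
  have hmap := PySem.List.map_snd_enumerate (xs := boxes) (s := (0 : Int))
  have hcnt : boxes.countP (fun c => pvInside b c) =
      (PySem.List.enumerate boxes 0).countP (fun q => pvInside b q.2) := by
    conv_lhs => rw [← hmap]
    rw [List.countP_map]
    rfl
  have hsplit := countP_split (PySem.List.enumerate boxes 0)
      (fun q => pvInside b q.2) (fun q => decide (q.1 = i))
  have hone := countP_key_eq_one i b (PySem.List.enumerate boxes 0) hpw hp
      (by rw [pvInside_eq_inside4]; exact pvInside4_refl _)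
  rw [pvInnerA_eq_any]
  cases hany :
      (PySem.List.enumerate boxes 0).any (fun q => decide (i ≠ q.1) && pvInside b q.2) with
  | true =>
      rw [List.any_eq_true] at hany
      obtain ⟨q, hq, hq2⟩ := hany
      simp only [Bool.and_eq_true, decide_eq_true_eq] at hq2
      have hpos :
          0 < (PySem.List.enumerate boxes 0).countP
              (fun q => pvInside b q.2 && !decide (q.1 = i)) := by
        rw [List.countP_pos_iff]
        exact ⟨q, hq, by simp [hq2.2, Ne.symm hq2.1]⟩
      have : boxes.countP (fun c => pvInside b c) ≠ 1 := by
        rw [hcnt, hsplit, hone]; omega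
      simp [this]
  | false =>
      have hzero :
          (PySem.List.enumerate boxes 0).countP
              (fun q => pvInside b q.2 && !decide (q.1 = i)) = 0 := by
        rw [List.countP_eq_zero]
        intro a ha
        rw [List.any_eq_false] at hany
        have := hany a ha
        simp only [Bool.and_eq_true, decide_eq_true_eq, not_and] at this ⊢
        intro hin
        rcases eq_or_ne a.1 i with h | h
        · simp [h]
        · exact absurd hin (this (Ne.symm h))
      have : boxes.countP (fun c => pvInside b c) = 1 := by
        rw [hcnt, hsplit, hone, hzero]
      simp [this]

-- filtering the enumeration by a predicate on the value, then projecting, is filtering the list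
theorem filter_enumerate_snd (q : List Int → Bool) (xs : List (List Int)) (s : Int) :
    ((PySem.List.enumerate xs s).filter (fun p => q p.2)).map (·.2) = xs.filter q := by
  induction xs generalizing s with
  | nil => simp [PySem.List.enumerate_nil]
  | cons x rest ih =>
      by_cases hx : q x = true <;>
        simp [PySem.List.enumerate_cons, hx, ih]

-- A as a filter by the containment count
theorem combine_inboxes_eq_filter (boxes : List (List Int)) :
    combine_inboxes boxes =
      boxes.filter (fun b => boxes.countP (fun c => pvInside b c) == 1) := by
  unfold combine_inboxes
  rw [show (fun (result : List (List Int)) (p : Int × List Int) =>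
        let combined := pvInnerA p.1 p.2 (PySem.List.enumerate boxes 0)
        if !combined then result ++ [p.2] else result) =
      (fun result p =>
        if (!pvInnerA p.1 p.2 (PySem.List.enumerate boxes 0)) then result ++ [p.2] else result)
    from rfl]
  rw [PySem.List.foldl_append_if
        (p := fun p : Int × List Int => !pvInnerA p.1 p.2 (PySem.List.enumerate boxes 0))
        (f := fun p : Int × List Int => p.2)]
  rw [List.filter_congr (fun p hp => keep_eq boxes p hp)]
  rw [show (fun p : Int × List Int => boxes.countP (fun c => pvInside p.2 c) == 1) =
      (fun p : Int × List Int => (fun b => boxes.countP (fun c => pvInside b c) == 1) p.2)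
    from rfl]
  simp only [List.nil_append]
  exact filter_enumerate_snd (fun b => boxes.countP (fun c => pvInside b c) == 1) boxes 0

-- ===== B-side: counts is a counter, frontier holds exactly the maximal keys =====

theorem pvCounts_eq_counter (boxes : List (List Int)) :
    pvCounts boxes = PySem.Dict.counter (boxes.map pvKey) := by
  rw [← PySem.Dict.foldl_insert_getD_add_one_eq_counter, List.foldl_map]
  rfl

-- frontier invariant: membership characterises the maximal keys of the processed
-- prefix, and every processed key is inside some frontier member
theorem frontier_spec (S : List (Int × Int × Int × Int)) (hnd : S.Nodup) :
    (∀ k, k ∈ S.foldl pvFrontStep [] ↔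
        k ∈ S ∧ ∀ m ∈ S, pvInside4 k m = true → m = k) ∧
    (∀ m ∈ S, ∃ f ∈ S.foldl pvFrontStep [], pvInside4 m f = true) := by
  induction S using List.reverseRecOn with
  | nil => simp
  | append_singleton T k ih =>
      have hT : T.Nodup := (List.nodup_append.mp hnd).1
      have hkT : k ∉ T := fun hk =>
        (List.nodup_append.mp hnd).2.2 k hk k (List.mem_singleton_self k) rfl
      obtain ⟨hmem, hcov⟩ := ih hT
      rw [List.foldl_append, List.foldl_cons, List.foldl_nil]
      set F := T.foldl pvFrontStep [] with hF
      by_cases hdom : F.any (fun m => pvInside4 k m) = true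
      · -- k is dominated by a frontier member: frontier unchanged
        obtain ⟨m0, hm0F, hm0in⟩ := List.any_eq_true.mp hdom
        have hm0T : m0 ∈ T := ((hmem m0).mp hm0F).1
        rw [show pvFrontStep F k = F by simp [pvFrontStep, hdom]]
        constructor
        · intro x
          constructor
          · intro hx
            obtain ⟨hxT, hxmax⟩ := (hmem x).mp hx
            refine ⟨List.mem_append_left _ hxT, ?_⟩
            intro m hm hxm
            rcases List.mem_append.mp hm with hmT | hmk
            · exact hxmax m hmT hxm
            · -- m = k: x inside k inside m0 ∈ T, so m0 = x, then k = x
              have hmk' : m = k := List.mem_singleton.mp hmk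
              subst hmk'
              have hxm0 : pvInside4 x m0 = true := pvInside4_trans hxm hm0in
              have := hxmax m0 hm0T hxm0
              subst this
              exact pvInside4_antisymm hm0in hxm
          · intro ⟨hx, hxmax⟩
            rcases List.mem_append.mp hx with hxT | hxk
            · refine (hmem x).mpr ⟨hxT, ?_⟩
              intro m hm hxm
              exact hxmax m (List.mem_append_left _ hm) hxm
            · -- x = k is impossible: k inside m0 ∈ T forces m0 = k ∈ T
              have hxk' : x = k := List.mem_singleton.mp hxk
              subst hxk'
              have := hxmax m0 (List.mem_append_left _ hm0T) hm0in
              subst this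
              exact absurd hm0T hkT
        · intro m hm
          rcases List.mem_append.mp hm with hmT | hmk
          · exact hcov m hmT
          · have : m = k := List.mem_singleton.mp hmk
            subst this
            exact ⟨m0, hm0F, hm0in⟩
      · -- k is not dominated: prune dominated frontier members and append k
        have hdom' : F.any (fun m => pvInside4 k m) = false := by
          simpa using hdom
        rw [show pvFrontStep F k = F.filter (fun m => !pvInside4 m k) ++ [k] by
              simp [pvFrontStep, hdom']]
        have hnotdom : ∀ m ∈ F, pvInside4 k m = true → False := fun m hm hin =>
          hdom (List.any_eq_true.mpr ⟨m, hm, hin⟩)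
        constructor
        · intro x
          constructor
          · intro hx
            rcases List.mem_append.mp hx with hxf | hxk
            · obtain ⟨hxF, hxnk⟩ := List.mem_filter.mp hxf
              obtain ⟨hxT, hxmax⟩ := (hmem x).mp hxF
              refine ⟨List.mem_append_left _ hxT, ?_⟩
              intro m hm hxm
              rcases List.mem_append.mp hm with hmT | hmk
              · exact hxmax m hmT hxm
              · have : m = k := List.mem_singleton.mp hmk
                subst this
                simp [hxm] at hxnk
            · have hxk' : x = k := List.mem_singleton.mp hxk
              subst hxk'
              refine ⟨List.mem_append_right _ (List.mem_singleton_self _), ?_⟩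
              intro m hm hxm
              rcases List.mem_append.mp hm with hmT | hmk
              · -- x=k inside m ∈ T: m is inside some frontier member f, so k inside f
                obtain ⟨f, hfF, hmf⟩ := hcov m hmT
                exact absurd (pvInside4_trans hxm hmf) (fun h => hnotdom f hfF h)
              · exact (List.mem_singleton.mp hmk)
          · intro ⟨hx, hxmax⟩
            rcases List.mem_append.mp hx with hxT | hxk
            · have hxF : x ∈ F := (hmem x).mpr ⟨hxT, fun m hm hxm =>
                hxmax m (List.mem_append_left _ hm) hxm⟩
              have hxnk : pvInside4 x k = false := by
                cases h : pvInside4 x k with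
                | false => rfl
                | true =>
                    have := hxmax k (List.mem_append_right _ (List.mem_singleton_self _)) h
                    subst this
                    exact absurd hxT hkT
              exact List.mem_append_left _ (List.mem_filter.mpr ⟨hxF, by simp [hxnk]⟩)
            · exact List.mem_append_right _ hxk
        · intro m hm
          rcases List.mem_append.mp hm with hmT | hmk
          · obtain ⟨f, hfF, hmf⟩ := hcov m hmT
            cases hfk : pvInside4 f k with
            | false =>
                exact ⟨f, List.mem_append_left _ (List.mem_filter.mpr ⟨hfF, by simp [hfk]⟩), hmf⟩
            | true =>
                exact ⟨k, List.mem_append_right _ (List.mem_singleton_self _),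
                  pvInside4_trans hmf hfk⟩
          · have : m = k := List.mem_singleton.mp hmk
            subst this
            exact ⟨m, List.mem_append_right _ (List.mem_singleton_self _), pvInside4_refl m⟩

-- a key's containment count over the key list is 1 iff it occurs once and is maximal
theorem countP_inside4_eq_one_iff (ks : List (Int × Int × Int × Int))
    (k : Int × Int × Int × Int) (hk : k ∈ ks) :
    (ks.countP (fun m => pvInside4 k m) = 1) ↔
      (ks.count k = 1 ∧ ∀ m ∈ ks, pvInside4 k m = true → m = k) := by
  have hsplit := countP_split ks (fun m => pvInside4 k m) (fun m => m == k)
  have heq1 : ks.countP (fun m => pvInside4 k m && (m == k)) = ks.count k := by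
    rw [List.count]
    apply List.countP_congr
    intro m _
    cases h : (m == k) with
    | false => simp
    | true =>
        have : m = k := by simpa using h
        subst this
        simp [pvInside4_refl]
  have hcnt1 : 1 ≤ ks.count k := List.one_le_count_iff.mpr hk
  constructor
  · intro h
    rw [hsplit, heq1] at h
    have hc : ks.count k = 1 := by omega
    have hz : ks.countP (fun m => pvInside4 k m && !(m == k)) = 0 := by omega
    refine ⟨hc, ?_⟩
    intro m hm hin
    by_contra hne
    have : 0 < ks.countP (fun m => pvInside4 k m && !(m == k)) := by
      rw [List.countP_pos_iff]
      exact ⟨m, hm, by simp [hin, hne]⟩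
    omega
  · intro ⟨hc, hmax⟩
    rw [hsplit, heq1, hc]
    have hz : ks.countP (fun m => pvInside4 k m && !(m == k)) = 0 := by
      rw [List.countP_eq_zero]
      intro m hm
      simp only [Bool.and_eq_true, Bool.not_eq_true', beq_eq_false_iff_ne, ne_eq, not_and]
      intro hin
      simp [hmax m hm hin]
    omega

-- ===== VERDICT (by name: the statement is the Claim_ definition above) =====
theorem combine_inboxes_spec : Claim_equal_combine_inboxes := by
  intro boxes _hdom _hpre
  unfold Spec_combine_inboxes
  rw [combine_inboxes_eq_filter]
  unfold combine_inboxes_alt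
  simp only
  apply List.filter_congr
  intro b hb
  -- rewrite everything to the key list ks
  set ks := boxes.map pvKey with hks
  set k := pvKey b with hkdef
  have hkks : k ∈ ks := List.mem_map_of_mem hb
  have hcounts := pvCounts_eq_counter boxes
  have hkeys : (pvCounts boxes).keys = PySem.Set.ofList ks := by
    rw [hcounts, PySem.Dict.keys_counter]
  have hgetD : ∀ m, (pvCounts boxes).getD m 0 = (ks.count m : Int) := by
    intro m; rw [hcounts, PySem.Dict.getD_counter]
  have hnd : (PySem.Set.ofList ks).Nodup := PySem.Set.nodup_ofList ks
  obtain ⟨hmem, _⟩ := frontier_spec (PySem.Set.ofList ks) hnd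
  -- A's test
  have hA : boxes.countP (fun c => pvInside b c) = ks.countP (fun m => pvInside4 k m) := by
    rw [hks, List.countP_map]
    apply List.countP_congr
    intro c _
    rw [Function.comp_apply, pvInside_eq_inside4]
  -- B's test
  have hBmem : PySem.Set.contains
      (PySem.Set.ofList
        (((pvCounts boxes).keys.foldl pvFrontStep []).filter
          (fun m => (pvCounts boxes).getD m 0 == 1))) k = true ↔
      (ks.count k = 1 ∧ ∀ m ∈ ks, pvInside4 k m = true → m = k) := by
    rw [PySem.Set.contains_iff, PySem.Set.mem_ofList, List.mem_filter, hkeys]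
    rw [hmem k]
    constructor
    · intro ⟨⟨_, hmax⟩, hc⟩
      rw [hgetD k] at hc
      refine ⟨by exact_mod_cast of_decide_eq_true hc, ?_⟩
      intro m hm hin
      exact hmax m ((PySem.Set.mem_ofList ks m).mpr hm) hin
    · intro ⟨hc, hmax⟩
      refine ⟨⟨(PySem.Set.mem_ofList ks k).mpr hkks, ?_⟩, ?_⟩
      · intro m hm hin
        exact hmax m ((PySem.Set.mem_ofList ks m).mp hm) hin
      · rw [hgetD k]
        exact decide_eq_true (by exact_mod_cast hc)
    -- end hBmem
  have hiff := countP_inside4_eq_one_iff ks k hkks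
  cases hval : PySem.Set.contains
      (PySem.Set.ofList
        (((pvCounts boxes).keys.foldl pvFrontStep []).filter
          (fun m => (pvCounts boxes).getD m 0 == 1))) k with
  | true =>
      have h1 := hiff.mpr (hBmem.mp hval)
      rw [hA]
      simp [h1]
  | false =>
      have hnot : ks.countP (fun m => pvInside4 k m) ≠ 1 := by
        intro h
        have := hBmem.mpr (hiff.mp h)
        rw [hval] at this
        exact Bool.false_ne_true this
      rw [hA]
      simp [hnot]
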